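-- pv_equiv track=rewrite | github.com/JH-TT/Coding_Practice | Programmers/Implementation_P/17681.py | solution
-- ===== SOURCE A (Python) =====
-- def solution(n, arr1, arr2):
--     answer = []
--     s = ''
--     for i in range(n):
--         bi = bin(arr1[i]|arr2[i])[2:]
--         bi = " " * (n-len(bi)) + bi
--         s += bi
--
--     s2 = ''
--     for i in s:
--         if i == "0":
--             s2 += " "
--         elif i == "1":
--             s2 += "#"
--         else:
--             s2 += i
--         if len(s2) == n:
--             answer.append(s2)
--             s2 = ''
--
--     return answer
-- ===== SOURCE B (Python) =====
-- def solution(n, arr1, arr2):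
--     if n <= 0:
--         return []
--     table = str.maketrans('01', ' #')
--     s = ''.join(bin(arr1[i] | arr2[i])[2:].rjust(n) for i in range(n)).translate(table)
--     return [s[i * n:(i + 1) * n] for i in range(len(s) // n)]
-- ===== Notes on version B (the rewrite author's own statement) =====
-- stated objective: idiomatic
-- what changed: Replaces A's two character-by-character accumulation loops (a flat string grown char by char, then re-chunked with a manual length counter) by a join of per-row rjust-padded binaries, one translate pass, and slicing the result into n-sized chunks.
import Mathlib
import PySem

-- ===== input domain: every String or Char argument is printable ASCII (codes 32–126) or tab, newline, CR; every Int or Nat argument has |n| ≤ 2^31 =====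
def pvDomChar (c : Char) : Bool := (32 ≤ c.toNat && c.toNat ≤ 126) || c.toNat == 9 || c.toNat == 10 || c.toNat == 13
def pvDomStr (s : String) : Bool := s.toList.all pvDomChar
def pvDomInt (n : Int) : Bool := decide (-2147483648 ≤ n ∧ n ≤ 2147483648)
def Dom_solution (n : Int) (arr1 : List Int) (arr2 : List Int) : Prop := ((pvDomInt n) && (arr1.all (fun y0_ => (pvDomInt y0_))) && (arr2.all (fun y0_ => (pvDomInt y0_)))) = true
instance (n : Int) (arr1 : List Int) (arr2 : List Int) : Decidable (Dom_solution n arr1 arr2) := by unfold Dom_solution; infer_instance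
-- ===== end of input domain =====

-- B builds each row's padded binary directly, translates the joined string in one pass and slices it
-- into n-sized chunks, instead of A's two character-by-character accumulation loops with a length counter.

-- ===== PORT A =====
def solution (n : Int) (arr1 : List Int) (arr2 : List Int) : List String :=
  -- answer = []; s = ''; for i in range(n): bi = bin(arr1[i]|arr2[i])[2:]; bi = " "*(n-len(bi)) + bi; s += bi
  let s : List Char := (PySem.List.pyRange 0 n 1).foldl
    (fun s i =>
      let bi := PySem.List.slice (PySem.Int.toBinChars0b
        (PySem.Int.bor (PySem.List.pyGetD arr1 i 0) (PySem.List.pyGetD arr2 i 0))) (some 2) none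
      let bi := PySem.List.pyRepeat [' '] (n - (bi.length : Int)) ++ bi
      s ++ bi) []
  -- s2 = ''; for i in s: translate the char, append; flush s2 into answer whenever len(s2) == n
  let p := s.foldl
    (fun (st : List String × List Char) c =>
      let s2 := st.2 ++ [if c = '0' then ' ' else if c = '1' then '#' else c]
      if (s2.length : Int) = n then (st.1 ++ [String.ofList s2], ([] : List Char)) else (st.1, s2))
    (([] : List String), ([] : List Char))
  p.1

-- ===== PORT B =====
def solution_alt (n : Int) (arr1 : List Int) (arr2 : List Int) : List String :=
  if n ≤ 0 then []
  else
    -- s = ''.join(bin(arr1[i] | arr2[i])[2:].rjust(n) for i in range(n)).translate(table)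
    let s : List Char := PySem.Chars.join []
      ((PySem.List.pyRange 0 n 1).map (fun i =>
        let b := PySem.List.slice (PySem.Int.toBinChars0b
          (PySem.Int.bor (PySem.List.pyGetD arr1 i 0) (PySem.List.pyGetD arr2 i 0))) (some 2) none
        -- b.rjust(n): left-pad with spaces to width n (exact for n > 0)
        List.replicate (n - (b.length : Int)).toNat ' ' ++ b))
    -- table = str.maketrans('01', ' #'); .translate(table) ported as the pointwise char map (exact)
    let t := s.map (fun c => if c = '0' then ' ' else if c = '1' then '#' else c)
    -- [s[i*n:(i+1)*n] for i in range(len(s)//n)]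
    (PySem.List.pyRange 0 (PySem.Int.floordiv (t.length : Int) n) 1).map
      (fun i => String.ofList (PySem.List.slice t (some (i * n)) (some ((i + 1) * n))))

-- ===== PRECONDITION & SPEC =====
-- Pre_ excludes exactly the inputs where the Python A raises IndexError (n exceeds a list's length).
def Pre_solution (n : Int) (arr1 : List Int) (arr2 : List Int) : Prop :=
  n ≤ (arr1.length : Int) ∧ n ≤ (arr2.length : Int)
instance (n : Int) (arr1 : List Int) (arr2 : List Int) : Decidable (Pre_solution n arr1 arr2) := by
  unfold Pre_solution; infer_instance
def pvWitness_solution : Int × List Int × List Int := (2, [1, 2], [2, 1])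

def Spec_solution (n : Int) (arr1 : List Int) (arr2 : List Int) (out : List String) : Prop := out = solution_alt n arr1 arr2
instance (n : Int) (arr1 : List Int) (arr2 : List Int) (out : List String) : Decidable (Spec_solution n arr1 arr2 out) := by unfold Spec_solution; infer_instance

-- ===== CLAIM (what is proved, stated in full; the proofs are below) =====
def Claim_equal_solution : Prop := ∀ (n : Int) (arr1 : List Int) (arr2 : List Int), Dom_solution n arr1 arr2 → Pre_solution n arr1 arr2 → Spec_solution n arr1 arr2 (solution n arr1 arr2)

-- ===== LEMMAS AND PROOFS =====

-- ''.join(parts) is flatten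
lemma pvJoinNil (parts : List (List Char)) : PySem.Chars.join [] parts = parts.flatten := by
  show [].intercalate parts = parts.flatten
  induction parts with
  | nil => rfl
  | cons x xs ih =>
    cases xs with
    | nil => simp [List.intercalate]
    | cons y ys =>
      simp [List.intercalate, List.intersperse] at *
      simpa [List.flatten] using ih

-- A's translating fold is the plain chunking fold over the translated string
lemma pvFoldTr (n : Int) (S : List Char) (init : List String × List Char) :
    S.foldl
      (fun (st : List String × List Char) c =>
        let s2 := st.2 ++ [if c = '0' then ' ' else if c = '1' then '#' else c]
        if (s2.length : Int) = n then (st.1 ++ [String.ofList s2], ([] : List Char)) else (st.1, s2))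
      init
    = (S.map (fun c => if c = '0' then ' ' else if c = '1' then '#' else c)).foldl
      (fun (st : List String × List Char) c =>
        let s2 := st.2 ++ [c]
        if (s2.length : Int) = n then (st.1 ++ [String.ofList s2], ([] : List Char)) else (st.1, s2))
      init := by
  rw [List.foldl_map]

-- A's chunking fold produces exactly the consecutive N-sized chunks (incomplete tail dropped)
lemma pvChunkFold (n : Int) (N : Nat) (hN : 0 < N) (hn : (N : Int) = n) :
    ∀ (t u : List Char) (ans : List String), u.length < N →
    (t.foldl
      (fun (st : List String × List Char) c =>
        let s2 := st.2 ++ [c]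
        if (s2.length : Int) = n then (st.1 ++ [String.ofList s2], ([] : List Char)) else (st.1, s2))
      (ans, u)).1
    = ans ++ (List.range ((u.length + t.length) / N)).map
        (fun i => String.ofList (((u ++ t).drop (i * N)).take N)) := by
  intro t
  induction t with
  | nil =>
    intro u ans hu
    simp [Nat.div_eq_of_lt hu]
  | cons c t ih =>
    intro u ans hu
    by_cases hc : u.length + 1 = N
    · have hlen : (u ++ [c]).length = N := by simpa using hc
      simp only [List.foldl_cons]
      rw [if_pos (by rw [← hn]; exact_mod_cast hlen)]
      rw [ih [] (ans ++ [String.ofList (u ++ [c])]) hN]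
      have hdiv : (u.length + (c :: t).length) / N = t.length / N + 1 := by
        have h1 : u.length + (c :: t).length = t.length + N := by simp; omega
        rw [h1, Nat.add_div_right _ hN]
      rw [hdiv, List.range_succ_eq_map, List.map_cons, List.append_assoc,
        List.singleton_append, List.append_cons u c t]
      simp only [List.length_nil, List.nil_append, Nat.zero_add]
      congr 1
      congr 1
      · rw [Nat.zero_mul, List.drop_zero, List.take_left' hlen]
      · rw [List.map_map]
        apply List.map_congr_left
        intro i _
        simp only [Function.comp]
        have h3 : List.drop (Nat.succ i * N) (u ++ [c] ++ t) = List.drop (i * N) t := by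
          rw [show Nat.succ i * N = N + i * N from by rw [Nat.succ_mul, Nat.add_comm],
            ← List.drop_drop, List.drop_left' hlen]
        rw [h3]
    · have hlt : (u ++ [c]).length < N := by simp; omega
      simp only [List.foldl_cons]
      rw [if_neg (by rw [← hn]; intro h; exact hc (by simpa using Int.natCast_inj.mp h))]
      rw [ih (u ++ [c]) ans hlt, ← List.append_cons u c t]
      have h4 : (u ++ [c]).length + t.length = u.length + (c :: t).length := by simp; omega
      rw [h4]

-- B's slice comprehension is the same chunk list
lemma pvChunksB (N : Nat) (hN : 0 < N) (t : List Char) :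
    (PySem.List.pyRange 0 (PySem.Int.floordiv (t.length : Int) (N : Int)) 1).map
      (fun i => String.ofList (PySem.List.slice t (some (i * (N : Int))) (some ((i + 1) * (N : Int)))))
    = (List.range (t.length / N)).map
        (fun i => String.ofList ((t.drop (i * N)).take N)) := by
  rw [PySem.Int.floordiv_natCast, PySem.List.pyRange_zero_nat, List.map_map]
  apply List.map_congr_left
  intro i _
  simp only [Function.comp]
  have h1 : (i : Int) * (N : Int) = ((i * N : Nat) : Int) := by push_cast; ring
  have h2 : ((i : Int) + 1) * (N : Int) = (((i + 1) * N : Nat) : Int) := by push_cast; ring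
  have h3 : (i + 1) * N - i * N = N := by rw [Nat.add_mul, Nat.one_mul]; omega
  rw [h1, h2, PySem.List.slice_natCast, h3]

-- the two first-phase strings coincide
lemma pvPhase1 (n : Int) (arr1 arr2 : List Int) :
    (PySem.List.pyRange 0 n 1).foldl
      (fun s i =>
        let bi := PySem.List.slice (PySem.Int.toBinChars0b
          (PySem.Int.bor (PySem.List.pyGetD arr1 i 0) (PySem.List.pyGetD arr2 i 0))) (some 2) none
        let bi := PySem.List.pyRepeat [' '] (n - (bi.length : Int)) ++ bi
        s ++ bi) []
    = PySem.Chars.join []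
      ((PySem.List.pyRange 0 n 1).map (fun i =>
        let b := PySem.List.slice (PySem.Int.toBinChars0b
          (PySem.Int.bor (PySem.List.pyGetD arr1 i 0) (PySem.List.pyGetD arr2 i 0))) (some 2) none
        List.replicate (n - (b.length : Int)).toNat ' ' ++ b)) := by
  simp only [PySem.List.pyRepeat_singleton]
  rw [PySem.List.foldl_append_eq_flatMap, List.nil_append, pvJoinNil, ← List.flatMap_def]

-- ===== VERDICT (by name: the statement is the Claim_ definition above) =====
theorem solution_spec : Claim_equal_solution := by
  intro n arr1 arr2 _hd _hp
  unfold Spec_solution solution solution_alt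
  by_cases hn : n ≤ 0
  · rw [if_pos hn]
    simp [PySem.List.pyRange_one_eq_nil hn]
  · rw [if_neg hn]
    rw [not_le] at hn
    obtain ⟨N, hNn, hN0⟩ : ∃ N : Nat, (N : Int) = n ∧ 0 < N := by
      refine ⟨n.toNat, Int.toNat_of_nonneg (le_of_lt hn), ?_⟩; omega
    simp only []
    rw [← pvPhase1 n arr1 arr2]
    set S : List Char := (PySem.List.pyRange 0 n 1).foldl
      (fun s i =>
        let bi := PySem.List.slice (PySem.Int.toBinChars0b
          (PySem.Int.bor (PySem.List.pyGetD arr1 i 0) (PySem.List.pyGetD arr2 i 0))) (some 2) none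
        let bi := PySem.List.pyRepeat [' '] (n - (bi.length : Int)) ++ bi
        s ++ bi) [] with hS
    rw [pvFoldTr n S (([] : List String), ([] : List Char))]
    rw [pvChunkFold n N hN0 hNn _ [] [] (by simpa using hN0)]
    rw [← hNn]
    rw [pvChunksB N hN0]
    simp
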